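-- pv_equiv track=rewrite | github.com/Ayaan2510/Projects | app.py | predict_secondary_structure
-- ===== SOURCE A (Python) =====
-- def predict_secondary_structure(sequence):
--     """Simple secondary structure prediction based on amino acid propensities"""
--     if not sequence:
--         return ""
--
--     # Propensity values for different secondary structures
--     helix_prone = set('AEILMQ')
--     sheet_prone = set('VIVYW')
--     turn_prone = set('NPGS')
--
--     structure = []
--     for i in range(len(sequence)):
--         if sequence[i] in helix_prone:
--             structure.append('H')  # Helix
--         elif sequence[i] in sheet_prone:
--             structure.append('E')  # Sheet
--         elif sequence[i] in turn_prone: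
--             structure.append('T')  # Turn
--         else:
--             structure.append('C')  # Coil
--
--     return ''.join(structure)
-- ===== SOURCE B (Python) =====
-- def predict_secondary_structure(sequence):
--     """Simple secondary structure prediction based on amino acid propensities"""
--     # Start from an all-coil assignment and rewrite it in three staged passes,
--     # lowest priority first; helix runs last so it overwrites the shared 'I'.
--     out = ['C'] * len(sequence)
--     for letters, label in (('NPGS', 'T'), ('VIVYW', 'E'), ('AEILMQ', 'H')):
--         out = [label if c in letters else o for c, o in zip(sequence, out)]
--     return ''.join(out)
-- ===== Notes on version B (the rewrite author's own statement) =====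
-- stated objective: alternative
-- what changed: Instead of one pass with a per-character if/elif branch chain, B starts from an all-coil string and rewrites it in three staged whole-sequence passes (turn, then sheet, then helix last), priority encoded by overwrite order rather than branch order.
import Mathlib
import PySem

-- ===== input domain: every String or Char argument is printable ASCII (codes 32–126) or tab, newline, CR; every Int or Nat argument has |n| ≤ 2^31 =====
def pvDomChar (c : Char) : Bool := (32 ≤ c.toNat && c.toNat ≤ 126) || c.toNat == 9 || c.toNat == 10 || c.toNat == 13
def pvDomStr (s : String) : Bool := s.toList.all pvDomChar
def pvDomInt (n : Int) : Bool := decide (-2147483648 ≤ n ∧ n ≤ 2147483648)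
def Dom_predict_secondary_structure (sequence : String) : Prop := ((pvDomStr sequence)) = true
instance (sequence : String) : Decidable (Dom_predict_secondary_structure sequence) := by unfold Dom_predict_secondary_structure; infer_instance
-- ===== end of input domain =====

-- B replaces A's single pass with a per-character if/elif branch chain by three staged
-- whole-sequence rewrite passes over an all-coil start (turn, sheet, then helix last so
-- overwrite order encodes priority): an alternative decomposition, same O(n) cost.

-- ===== PORT A =====
def predict_secondary_structure (sequence : String) : String :=
  if sequence = "" then ""
  else
    let helix_prone := PySem.Set.ofList "AEILMQ".toList
    let sheet_prone := PySem.Set.ofList "VIVYW".toList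
    let turn_prone  := PySem.Set.ofList "NPGS".toList
    let struc : List Char :=
      (PySem.List.pyRange 0 (PySem.Str.len sequence) 1).foldl
        (fun acc i =>
          let c := PySem.List.pyGetD sequence.toList i ' '
          if PySem.Set.contains helix_prone c then acc ++ ['H']
          else if PySem.Set.contains sheet_prone c then acc ++ ['E']
          else if PySem.Set.contains turn_prone c then acc ++ ['T']
          else acc ++ ['C']) []
    String.ofList struc

-- ===== PORT B =====
-- 'c in letters' (letters a string, c a single character) is ported exactly as
-- character membership letters.toList.contains c.
def predict_secondary_structure_alt (sequence : String) : String :=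
  let out0 : List Char := List.replicate sequence.toList.length 'C'
  let out := [(("NPGS" : String), 'T'), (("VIVYW" : String), 'E'), (("AEILMQ" : String), 'H')].foldl
      (fun out p =>
        List.zipWith (fun c o => if p.1.toList.contains c then p.2 else o) sequence.toList out)
      out0
  String.ofList out

-- ===== PRECONDITION & SPEC =====
def Spec_predict_secondary_structure (sequence : String) (out : String) : Prop := out = predict_secondary_structure_alt sequence
instance (sequence : String) (out : String) : Decidable (Spec_predict_secondary_structure sequence out) := by unfold Spec_predict_secondary_structure; infer_instance

-- ===== CLAIM =====
def Claim_equal_predict_secondary_structure : Prop := ∀ (sequence : String), Dom_predict_secondary_structure sequence → Spec_predict_secondary_structure sequence (predict_secondary_structure sequence)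

-- ===== LEMMAS AND PROOFS =====

-- A's per-character branch chain
def pvStepA (c : Char) : Char :=
  if PySem.Set.contains (PySem.Set.ofList "AEILMQ".toList) c then 'H'
  else if PySem.Set.contains (PySem.Set.ofList "VIVYW".toList) c then 'E'
  else if PySem.Set.contains (PySem.Set.ofList "NPGS".toList) c then 'T'
  else 'C'

theorem pv_zipWith_map_self {α β γ : Type} (f : α → β → γ) (g : α → β) (l : List α) :
    List.zipWith f l (l.map g) = l.map (fun a => f a (g a)) := by
  induction l with
  | nil => rfl
  | cons x xs ih => simp [ih]

theorem pvStep_eq (c : Char) :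
    pvStepA c =
      (if "AEILMQ".toList.contains c then 'H'
       else if "VIVYW".toList.contains c then 'E'
       else if "NPGS".toList.contains c then 'T' else 'C') := by
  simp only [pvStepA, PySem.Set.contains]
  simp [List.contains_eq_mem, PySem.Set.mem_ofList]

-- A reduces to one map of the branch chain
theorem pvA_eq_map (sequence : String) :
    predict_secondary_structure sequence = String.ofList (sequence.toList.map pvStepA) := by
  unfold predict_secondary_structure
  by_cases hs : sequence = ""
  · subst hs; rfl
  · simp only [if_neg hs]
    have hb : (fun (acc : List Char) (i : Int) =>
        let c := PySem.List.pyGetD sequence.toList i ' '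
        if PySem.Set.contains (PySem.Set.ofList "AEILMQ".toList) c then acc ++ ['H']
        else if PySem.Set.contains (PySem.Set.ofList "VIVYW".toList) c then acc ++ ['E']
        else if PySem.Set.contains (PySem.Set.ofList "NPGS".toList) c then acc ++ ['T']
        else acc ++ ['C'])
      = fun acc i => acc ++ [pvStepA (PySem.List.pyGetD sequence.toList i ' ')] := by
      funext acc i
      simp only [pvStepA]
      split_ifs <;> rfl
    rw [hb]
    simp only [PySem.Str.len_eq]
    rw [PySem.List.foldl_pyRange_zero_pyGetD' sequence.toList ' ' (fun acc c => acc ++ [pvStepA c]) []]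
    rw [PySem.List.foldl_append_singleton_eq_map]
    simp

-- ===== VERDICT =====
theorem predict_secondary_structure_spec : Claim_equal_predict_secondary_structure := by
  intro sequence _
  unfold Spec_predict_secondary_structure
  rw [pvA_eq_map]
  unfold predict_secondary_structure_alt
  simp only [List.foldl]
  rw [← List.map_const, pv_zipWith_map_self, pv_zipWith_map_self, pv_zipWith_map_self]
  congr 1
  apply List.map_congr_left
  intro c _
  rw [pvStep_eq]
  split_ifs <;> rfl
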